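-- pv_equiv track=rewrite | github.com/marton-ollari/lynx-test | test3.py | min_robot
-- ===== SOURCE A (Python) =====
-- def min_robot(table):
--     length = len(table)
--     width = len(table[0])
--     sum = 0
--     index1 = 0
--     index2 = 0
--     if width > length:
--         for i in range(width-length):
--             sum += table[index1][index2]
--             index2 += 1
--     else:
--         for i in range(length-width):
--             sum += table[index1][index2]
--             index1 += 1
--
--     while (index1 <= length and index2 < width):
--         sum += table[index1][index2]
--         if index2+1 < width:
--             sum += table[index1][index2+1]
--         index2 += 1
--         index1 += 1
--     return sum
-- ===== SOURCE B (Python) =====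
-- def min_robot(table):
--     length = len(table)
--     width = len(table[0])
--     d = width - length
--     total = 0
--     for r in range(length):
--         s = d + r
--         if s < 0:
--             start, end = 0, 1
--         elif r == 0:
--             start, end = 0, min(width, s + 2)
--         else:
--             start, end = s, min(width, s + 2)
--         total += sum(table[r][start:end])
--     return total
-- ===== Notes on version B (the rewrite author's own statement) =====
-- stated objective: simpler
-- what changed: B replaces A's diagonal two-pointer walk (a pre-loop plus a while loop adding neighbour pairs) by a single loop over rows that sums one contiguous column slice table[r][start:end] per row, with start/end computed from the row's offset to the diagonal.
import Mathlib
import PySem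

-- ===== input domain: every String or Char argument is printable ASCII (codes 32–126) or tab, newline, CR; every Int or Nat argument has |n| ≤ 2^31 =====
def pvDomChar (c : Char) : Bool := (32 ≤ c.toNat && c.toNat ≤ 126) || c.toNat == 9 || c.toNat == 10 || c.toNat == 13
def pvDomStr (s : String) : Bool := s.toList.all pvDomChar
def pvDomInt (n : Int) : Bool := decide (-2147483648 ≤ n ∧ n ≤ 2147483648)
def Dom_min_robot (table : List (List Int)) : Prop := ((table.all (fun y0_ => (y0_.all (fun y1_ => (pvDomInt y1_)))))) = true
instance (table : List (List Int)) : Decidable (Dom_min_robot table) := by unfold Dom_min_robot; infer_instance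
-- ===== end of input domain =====

-- B replaces A's diagonal two-pointer walk by one loop over rows summing a contiguous
-- column slice per row (objective: simpler); equivalence is proved on Pre_, exactly the
-- inputs where A returns normally.

-- ===== PORT A =====
-- table[i][j]; total form, only used at indices Pre_ keeps in range
def pvCellA (table : List (List Int)) (i j : Int) : Int :=
  PySem.List.pyGetD (PySem.List.pyGetD table i []) j 0

-- 'while index1 <= length and index2 < width: …'
def pvWhileA (table : List (List Int)) (length width : Int) (sum i1 i2 : Int) : Int :=
  if _h : i1 ≤ length ∧ i2 < width then
    let s1 := sum + pvCellA table i1 i2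
    let s2 := if i2 + 1 < width then s1 + pvCellA table i1 (i2 + 1) else s1
    pvWhileA table length width s2 (i1 + 1) (i2 + 1)
  else sum
termination_by (width - i2).toNat
decreasing_by omega

def min_robot (table : List (List Int)) : Int :=
  let length : Int := table.length
  let width : Int := (PySem.List.pyGetD table 0 []).length
  let st :=
    if width > length then
      (PySem.List.pyRange 0 (width - length) 1).foldl
        (fun (st : Int × Int × Int) _ => (st.1 + pvCellA table st.2.1 st.2.2, st.2.1, st.2.2 + 1))
        (0, 0, 0)
    else
      (PySem.List.pyRange 0 (length - width) 1).foldl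
        (fun (st : Int × Int × Int) _ => (st.1 + pvCellA table st.2.1 st.2.2, st.2.1 + 1, st.2.2))
        (0, 0, 0)
  pvWhileA table length width st.1 st.2.1 st.2.2

-- ===== PORT B =====
-- B's loop body: the slice bounds for row r and the slice sum (literally Source B's body)
def pvRowB (table : List (List Int)) (d width : Int) (r : Int) : Int :=
  let s := d + r
  let p : Int × Int :=
    if s < 0 then (0, 1)
    else if r = 0 then (0, min width (s + 2))
    else (s, min width (s + 2))
  (PySem.List.slice (PySem.List.pyGetD table r []) (some p.1) (some p.2)).sum

def min_robot_alt (table : List (List Int)) : Int :=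
  let length : Int := table.length
  let width : Int := (PySem.List.pyGetD table 0 []).length
  let d := width - length
  (PySem.List.pyRange 0 length 1).foldl (fun total r => total + pvRowB table d width r) 0

-- ===== PRECONDITION & SPEC =====
-- Pre_ is exactly the set of inputs on which A returns (everywhere else A raises IndexError):
-- the table is nonempty, its first row is nonempty, and every row contains all cells the
-- robot's path visits in it — one cell for a row above the diagonal, otherwise the (at most
-- two) path cells starting at column d + r, clamped to the width read off the first row.
def Pre_min_robot (table : List (List Int)) : Prop :=
  table ≠ [] ∧ 0 < (table.headI).length ∧
  ∀ r < table.length,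
    (if ((table.headI).length : Int) - table.length + r < 0 then 1
     else min ((table.headI).length : Int) (((table.headI).length : Int) - table.length + r + 2))
      ≤ ((table.getD r []).length : Int)
instance (table : List (List Int)) : Decidable (Pre_min_robot table) := by
  unfold Pre_min_robot; infer_instance

def pvWitness_min_robot : List (List Int) := [[1, 2], [3, 4]]

def Spec_min_robot (table : List (List Int)) (out : Int) : Prop := out = min_robot_alt table
instance (table : List (List Int)) (out : Int) : Decidable (Spec_min_robot table out) := by
  unfold Spec_min_robot; infer_instance

-- ===== CLAIM (what is proved, stated in full; the proofs are below) =====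
def Claim_equal_min_robot : Prop :=
  ∀ (table : List (List Int)), Dom_min_robot table → Pre_min_robot table →
    Spec_min_robot table (min_robot table)

-- ===== LEMMAS AND PROOFS =====

-- the two cells A's while loop adds at row i1 (column offset d = width - length)
def pvWin (table : List (List Int)) (d width : Int) (i1 : Int) : Int :=
  pvCellA table i1 (i1 + d) +
    (if i1 + d + 1 < width then pvCellA table i1 (i1 + d + 1) else 0)

lemma fold1_spec (t : List (List Int)) (l : List Int) (a i j : Int) :
    l.foldl (fun (st : Int × Int × Int) _ => (st.1 + pvCellA t st.2.1 st.2.2, st.2.1, st.2.2 + 1)) (a, i, j)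
      = (a + ((List.range l.length).map (fun k : Nat => pvCellA t i (j + (k : Int)))).sum, i, j + (l.length : Int)) := by
  induction l generalizing a j with
  | nil => simp
  | cons x xs ih =>
      rw [List.foldl_cons, ih]
      have hmap : List.map (fun k : Nat => pvCellA t i (j + (k : Int))) (List.range (xs.length + 1))
          = pvCellA t i j :: List.map (fun k : Nat => pvCellA t i (j + 1 + (k : Int))) (List.range xs.length) := by
        rw [List.range_succ_eq_map, List.map_cons, List.map_map]
        simp only [Nat.cast_zero, add_zero]
        congr 1
        refine List.map_congr_left (fun k _ => ?_)
        simp only [Function.comp_apply]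
        push_cast
        ring_nf
      simp only [List.length_cons, hmap, List.sum_cons]
      refine Prod.ext ?_ (Prod.ext rfl ?_) <;> push_cast <;> ring

lemma fold2_spec (t : List (List Int)) (l : List Int) (a i j : Int) :
    l.foldl (fun (st : Int × Int × Int) _ => (st.1 + pvCellA t st.2.1 st.2.2, st.2.1 + 1, st.2.2)) (a, i, j)
      = (a + ((List.range l.length).map (fun k : Nat => pvCellA t (i + (k : Int)) j)).sum, i + (l.length : Int), j) := by
  induction l generalizing a i with
  | nil => simp
  | cons x xs ih =>
      rw [List.foldl_cons, ih]
      have hmap : List.map (fun k : Nat => pvCellA t (i + (k : Int)) j) (List.range (xs.length + 1))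
          = pvCellA t i j :: List.map (fun k : Nat => pvCellA t (i + 1 + (k : Int)) j) (List.range xs.length) := by
        rw [List.range_succ_eq_map, List.map_cons, List.map_map]
        simp only [Nat.cast_zero, add_zero]
        congr 1
        refine List.map_congr_left (fun k _ => ?_)
        simp only [Function.comp_apply]
        push_cast
        ring_nf
      simp only [List.length_cons, hmap, List.sum_cons]
      refine Prod.ext ?_ (Prod.ext ?_ rfl) <;> push_cast <;> ring

lemma while_spec (t : List (List Int)) (L w d : Int) (hd : d = w - L)
    (n : Nat) (i1 : Int) (hn : (L - i1).toNat = n) (s : Int) :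
    pvWhileA t L w s i1 (i1 + d)
      = s + ((List.range n).map (fun j : Nat => pvWin t d w (i1 + (j : Int)))).sum := by
  induction n generalizing i1 s with
  | zero =>
      rw [pvWhileA, dif_neg (by omega)]
      simp
  | succ n ih =>
      rw [pvWhileA, dif_pos (by omega : i1 ≤ L ∧ i1 + d < w)]
      have e1 : i1 + d + 1 = (i1 + 1) + d := by ring
      rw [e1, ih (i1 + 1) (by omega)]
      have hmap : List.map (fun j : Nat => pvWin t d w (i1 + (j : Int))) (List.range (n + 1))
          = pvWin t d w i1 :: List.map (fun j : Nat => pvWin t d w (i1 + 1 + (j : Int))) (List.range n) := by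
        rw [List.range_succ_eq_map, List.map_cons, List.map_map]
        simp only [Nat.cast_zero, add_zero]
        congr 1
        refine List.map_congr_left (fun k _ => ?_)
        simp only [Function.comp_apply]
        push_cast
        ring_nf
      rw [hmap, List.sum_cons, pvWin, e1]
      split_ifs <;> ring

lemma sum_range_getD (row : List Int) (n : Nat) (h : n ≤ row.length) :
    ((List.range n).map (fun k : Nat => row.getD k 0)).sum = (row.take n).sum := by
  induction n with
  | zero => simp
  | succ n ih =>
      rw [List.range_succ, List.map_append, List.sum_append, ih (by omega),
        List.sum_take_succ row n (by omega)]
      simp [List.getElem?_eq_getElem (by omega : n < row.length)]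

-- sum of B's slice on a diagonal row, as the two path cells
lemma slice_win (row : List Int) (wN j : Nat) (hjw : j < wN)
    (hlen : min wN (j + 2) ≤ row.length) :
    (PySem.List.slice row (some (j : Int)) (some (min (wN : Int) ((j : Int) + 2)))).sum
      = row.getD j 0 + (if (j : Int) + 1 < (wN : Int) then row.getD (j + 1) 0 else 0) := by
  have hmin : min (wN : Int) ((j : Int) + 2) = ((min wN (j + 2) : Nat) : Int) := by
    push_cast; omega
  rw [hmin, PySem.List.slice_natCast]
  by_cases hc : j + 1 < wN
  · have h2 : min wN (j + 2) = j + 2 := by omega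
    have hl2 : j + 1 < row.length := by omega
    rw [h2, if_pos (by exact_mod_cast hc)]
    rw [List.drop_eq_getElem_cons (by omega : j < row.length), List.drop_eq_getElem_cons hl2]
    simp only [Nat.add_sub_cancel_left, List.take_succ_cons, List.take_zero, List.sum_cons,
      List.sum_nil]
    rw [List.getD_eq_getElem row 0 (by omega : j < row.length), List.getD_eq_getElem row 0 hl2]
    ring
  · have h1 : min wN (j + 2) = j + 1 := by omega
    have hl1 : j < row.length := by omega
    rw [h1, if_neg (by exact_mod_cast hc)]
    rw [List.drop_eq_getElem_cons hl1]
    simp only [Nat.add_sub_cancel_left, List.take_succ_cons, List.take_zero, List.sum_cons,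
      List.sum_nil]
    rw [List.getD_eq_getElem row 0 hl1]

-- a row above the diagonal contributes its first cell
lemma rowB_above (t : List (List Int)) (d w : Int) (r : Nat)
    (hs : d + (r : Int) < 0) (hlen : 0 < (t.getD r []).length) :
    pvRowB t d w (r : Int) = pvCellA t (r : Int) 0 := by
  simp only [pvRowB, pvCellA, if_pos hs, PySem.List.pyGetD_natCast]
  obtain ⟨x, rest, hx⟩ : ∃ x rest, t.getD r [] = x :: rest := by
    cases h : t.getD r [] with
    | nil => rw [h] at hlen; simp at hlen
    | cons x rest => exact ⟨x, rest, rfl⟩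
  rw [hx, show ((0:Int)) = ((0:Nat):Int) from rfl, show ((1:Int)) = ((1:Nat):Int) from rfl,
    PySem.List.slice_natCast]
  simp [PySem.List.pyGetD_zero]

-- a diagonal row contributes A's while-loop window
lemma rowB_diag (t : List (List Int)) (d : Int) (wN : Nat) (r j : Nat)
    (hj : d + (r : Int) = (j : Int)) (hjw : j < wN) (hr0 : r = 0 → d = 0)
    (hlen : min wN (j + 2) ≤ (t.getD r []).length) :
    pvRowB t d (wN : Int) (r : Int) = pvWin t d (wN : Int) (r : Int) := by
  have hs : ¬ (d + (r : Int) < 0) := by omega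
  simp only [pvRowB, pvWin, pvCellA, if_neg hs, PySem.List.pyGetD_natCast]
  have hpair : (if (r : Int) = 0 then ((0 : Int), min (wN : Int) (d + (r : Int) + 2))
        else (d + (r : Int), min (wN : Int) (d + (r : Int) + 2)))
      = ((j : Int), min (wN : Int) ((j : Int) + 2)) := by
    split_ifs with h
    · have hr : r = 0 := by exact_mod_cast h
      have hd0 : d = 0 := hr0 hr
      have hj0 : j = 0 := by omega
      subst hr hj0
      rw [hd0]
      norm_num
    · rw [hj]
  rw [hpair, slice_win (t.getD r []) wN j hjw hlen]
  have hj' : (r : Int) + d = (j : Int) := by omega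
  rw [hj']
  simp only [show ((j : Int) + 1) = ((j + 1 : Nat) : Int) from by push_cast; ring,
    PySem.List.pyGetD_natCast]

-- B's first row, when the table is wider than long: A's pre-loop plus the first window
lemma rowB_zero (t : List (List Int)) (L wN : Nat) (hL : 0 < L)
    (hw : (t.getD 0 []).length = wN) (hd : 0 < (wN : Int) - (L : Int)) :
    pvRowB t ((wN : Int) - (L : Int)) (wN : Int) 0
      = ((List.range ((wN : Int) - (L : Int)).toNat).map
            (fun k : Nat => pvCellA t 0 ((0 : Int) + (k : Int)))).sum
        + pvWin t ((wN : Int) - (L : Int)) (wN : Int) 0 := by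
  set d : Int := (wN : Int) - (L : Int) with hdd
  set dN : Nat := d.toNat with hdN
  have hdn : (dN : Int) = d := by omega
  have hs : ¬ (d + (0 : Int) < 0) := by omega
  simp only [pvRowB, pvWin, pvCellA, if_neg hs, if_true, PySem.List.pyGetD_zero]
  rw [PySem.List.slice_zero_start, PySem.List.slice_to (t.getD 0 []) (by omega : (0:Int) ≤ min (wN : Int) (d + 0 + 2))]
  have he : (min (wN : Int) (d + 0 + 2)).toNat = min wN (dN + 2) := by omega
  rw [he]
  have hpre : ((List.range dN).map (fun k : Nat =>
        PySem.List.pyGetD (t.getD 0 []) ((0 : Int) + (k : Int)) 0)).sum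
      = ((t.getD 0 []).take dN).sum := by
    rw [← sum_range_getD (t.getD 0 []) dN (by omega)]
    refine congrArg List.sum (List.map_congr_left (fun k _ => ?_))
    rw [zero_add, PySem.List.pyGetD_natCast]
  rw [hpre]
  have hd0 : (0 : Int) + d = (dN : Int) := by omega
  rw [hd0, PySem.List.pyGetD_natCast]
  by_cases hc : dN + 1 < wN
  · have hmin : min wN (dN + 2) = dN + 1 + 1 := by omega
    rw [hmin, List.sum_take_succ _ (dN + 1) (by omega), List.sum_take_succ _ dN (by omega)]
    rw [if_pos (by omega : ((dN : Nat) : Int) + 1 < (wN : Int))]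
    rw [show (((dN : Nat) : Int) + 1) = ((dN + 1 : Nat) : Int) from by push_cast; ring,
      PySem.List.pyGetD_natCast]
    rw [List.getD_eq_getElem _ 0 (by omega : dN < (t.getD 0 []).length),
      List.getD_eq_getElem _ 0 (by omega : dN + 1 < (t.getD 0 []).length)]
    ring
  · have hmin : min wN (dN + 2) = dN + 1 := by omega
    rw [hmin, List.sum_take_succ _ dN (by omega)]
    rw [if_neg (by omega : ¬ (((dN : Nat) : Int) + 1 < (wN : Int)))]
    rw [List.getD_eq_getElem _ 0 (by omega : dN < (t.getD 0 []).length)]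
    ring

-- ===== VERDICT (by name: the statement is the Claim_ definition above) =====
theorem min_robot_spec : Claim_equal_min_robot := by
  unfold Claim_equal_min_robot
  intro t _ hPre
  unfold Spec_min_robot
  obtain ⟨hne, hw0, hrows⟩ := hPre
  have hhead : t.headI = t.getD 0 [] := by
    cases t with
    | nil => exact absurd rfl hne
    | cons a l => rfl
  rw [hhead] at hw0 hrows
  have hL0 : 0 < t.length := List.length_pos_iff.mpr hne
  simp only [min_robot, min_robot_alt, PySem.List.pyGetD_zero]
  set LN := t.length with hLN
  set wN := (t.getD 0 []).length with hwN
  by_cases hcase : ((wN : Int)) > ((LN : Int))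
  · -- wider than long
    rw [if_pos hcase, fold1_spec]
    dsimp only
    rw [PySem.List.length_pyRange_one]
    simp only [sub_zero, zero_add]
    have hwhile : ∀ s : Int,
        pvWhileA t (LN : Int) (wN : Int) s 0 (((((wN : Int) - (LN : Int)).toNat : Nat) : Int))
          = s + ((List.range LN).map (fun j : Nat =>
              pvWin t ((wN : Int) - (LN : Int)) (wN : Int) ((j : Int)))).sum := by
      intro s
      have h := while_spec t (LN : Int) (wN : Int) ((wN : Int) - (LN : Int)) rfl LN 0 (by omega) s
      rw [show ((0 : Int) + ((wN : Int) - (LN : Int)))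
          = (((((wN : Int) - (LN : Int)).toNat : Nat) : Int)) from by omega] at h
      simp only [zero_add] at h
      exact h
    rw [hwhile]
    -- B as a sum over rows
    rw [PySem.List.foldl_add, PySem.List.pyRange_one 0 ((LN : Int)), List.map_map,
      show (((LN : Int)) - 0).toNat = LN from by omega]
    -- split off row 0 on both sides
    have hsplit : List.range LN = List.range 1 ++ (List.range (LN - 1)).map (1 + ·) := by
      rw [← List.range_add]; congr 1; omega
    rw [hsplit]
    simp only [List.map_append, List.sum_append, List.map_map, List.range_one, List.map_cons,
      List.map_nil, List.sum_cons, List.sum_nil, Function.comp_def, Nat.cast_zero, add_zero,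
      zero_add]
    rw [rowB_zero t LN wN hL0 rfl (by omega)]
    have htail : List.map (fun x : Nat => pvRowB t ((wN : Int) - (LN : Int)) ((wN : Int)) (((1 + x : Nat) : Int))) (List.range (LN - 1))
        = List.map (fun x : Nat => pvWin t ((wN : Int) - (LN : Int)) ((wN : Int)) (((1 + x : Nat) : Int))) (List.range (LN - 1)) := by
      refine List.map_congr_left (fun k hk => ?_)
      have hklt : k < LN - 1 := List.mem_range.mp hk
      refine rowB_diag t ((wN : Int) - (LN : Int)) wN (1 + k) (wN - LN + 1 + k)
        (by push_cast; omega) (by omega) (by omega) ?_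
      have := hrows (1 + k) (by omega)
      rw [if_neg (by push_cast; omega)] at this
      omega
    rw [htail]
    ring
  · -- at least as long as wide
    rw [if_neg hcase, fold2_spec]
    dsimp only
    rw [PySem.List.length_pyRange_one]
    simp only [sub_zero, zero_add]
    have hwhile : ∀ s : Int,
        pvWhileA t (LN : Int) (wN : Int) s (((((LN : Int) - (wN : Int)).toNat : Nat) : Int)) 0
          = s + ((List.range wN).map (fun j : Nat =>
              pvWin t ((wN : Int) - (LN : Int)) (wN : Int)
                ((((((LN : Int) - (wN : Int)).toNat : Nat) : Int)) + (j : Int)))).sum := by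
      intro s
      have h := while_spec t (LN : Int) (wN : Int) ((wN : Int) - (LN : Int)) rfl wN
        (((((LN : Int) - (wN : Int)).toNat : Nat) : Int)) (by omega) s
      rw [show ((((((LN : Int) - (wN : Int)).toNat : Nat) : Int)) + ((wN : Int) - (LN : Int)))
          = (0 : Int) from by omega] at h
      exact h
    rw [hwhile]
    -- B as a sum over rows
    rw [PySem.List.foldl_add, PySem.List.pyRange_one 0 ((LN : Int)), List.map_map,
      show (((LN : Int)) - 0).toNat = LN from by omega]
    -- split B's rows at the diagonal
    have hsplit : List.range LN = List.range (LN - wN) ++ (List.range wN).map ((LN - wN) + ·) := by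
      rw [← List.range_add]; congr 1; omega
    rw [hsplit]
    simp only [List.map_append, List.sum_append, List.map_map, Function.comp_def, zero_add]
    rw [show (((LN : Int) - (wN : Int)).toNat) = LN - wN from by omega]
    have hfirst : List.map (fun x : Nat => pvRowB t ((wN : Int) - (LN : Int)) ((wN : Int)) ((x : Int))) (List.range (LN - wN))
        = List.map (fun k : Nat => pvCellA t ((k : Int)) 0) (List.range (LN - wN)) := by
      refine List.map_congr_left (fun k hk => ?_)
      have hklt : k < LN - wN := List.mem_range.mp hk
      rw [rowB_above t ((wN : Int) - (LN : Int)) ((wN : Int)) k (by omega) ?_]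
      have := hrows k (by omega)
      rw [if_pos (by omega)] at this
      omega
    have hsecond : List.map (fun x : Nat => pvRowB t ((wN : Int) - (LN : Int)) ((wN : Int)) (((LN - wN + x : Nat) : Int))) (List.range wN)
        = List.map (fun j : Nat => pvWin t ((wN : Int) - (LN : Int)) ((wN : Int))
            ((((LN - wN : Nat)) : Int) + (j : Int))) (List.range wN) := by
      refine List.map_congr_left (fun j hj => ?_)
      have hjlt : j < wN := List.mem_range.mp hj
      rw [show ((((LN - wN : Nat)) : Int) + (j : Int))
          = (((LN - wN + j : Nat)) : Int) from by push_cast; ring]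
      refine rowB_diag t ((wN : Int) - (LN : Int)) wN (LN - wN + j) j
        (by push_cast; omega) (by omega) (by omega) ?_
      have := hrows (LN - wN + j) (by omega)
      rw [if_neg (by push_cast; omega)] at this
      omega
    rw [hfirst, hsecond]
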